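-- pv_equiv track=rewrite | github.com/Rhys-Davies/slamrobot | robot.py | findLandmarkIndex
-- ===== SOURCE A (Python) =====
-- def findLandmarkIndex(ident,ident_list):
--     # Must return -1 if an invalid landmark was given
--     # Takes the ID of the landmark from the sensor and
--     # Compares it to the list of known landmarks.
--     # Returns the known X and Y co-ords of the landmark.
--
--     n1 = -1
--     n2 = -1
--
--     # For-else loops are cool.
--     for i in range(0,len(ident_list)):
--         if ident[0] == ident_list[i]: # If the ID's match
--             n1 = i #The index of the landmark
--
--
--     for i in range(0,len(ident_list)):
--         if ident[1] == ident_list[i]: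
--             n2 = i
--
--     return n1, n2
-- ===== SOURCE B (Python) =====
-- def findLandmarkIndex(ident, ident_list):
--     # Scan from the END: the first match seen is the last index; stop early
--     # once both landmarks have been located.
--     a, b = ident[0], ident[1]
--     n1 = n2 = -1
--     for i, v in reversed(list(enumerate(ident_list))):
--         if n1 == -1 and v == a:
--             n1 = i
--         if n2 == -1 and v == b:
--             n2 = i
--         if n1 != -1 and n2 != -1:
--             break
--     return n1, n2
-- ===== Notes on version B (the rewrite author's own statement) =====
-- stated objective: alternative
-- what changed: Replaces A's two full forward scans (each keeping the latest match) with a single backward scan that takes the first match per landmark and breaks as soon as both are found.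
-- outside the precondition, e.g. on findLandmarkIndex([], []): A returns (-1, -1), B raises IndexError
import Mathlib
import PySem

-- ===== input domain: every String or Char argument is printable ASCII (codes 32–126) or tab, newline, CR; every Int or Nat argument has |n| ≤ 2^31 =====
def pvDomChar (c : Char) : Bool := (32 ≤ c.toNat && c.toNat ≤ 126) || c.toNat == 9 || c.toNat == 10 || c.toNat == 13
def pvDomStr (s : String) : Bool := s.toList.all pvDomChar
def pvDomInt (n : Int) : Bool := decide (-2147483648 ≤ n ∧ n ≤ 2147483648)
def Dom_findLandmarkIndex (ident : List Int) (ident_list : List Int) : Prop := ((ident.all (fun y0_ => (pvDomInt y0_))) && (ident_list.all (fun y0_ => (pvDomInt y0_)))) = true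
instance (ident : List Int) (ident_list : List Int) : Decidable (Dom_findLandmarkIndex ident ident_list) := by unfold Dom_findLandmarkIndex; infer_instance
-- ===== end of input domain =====

-- B replaces A's two full forward scans by one backward scan over reversed(enumerate(...))
-- taking the first match per landmark and breaking once both are found (objective: alternative).


-- ===== PORT A =====
-- Two scans over range(0, len(ident_list)); n1/n2 keep the last matching index.
-- ident[0] / ident[1] and ident_list[i] are in range under Pre_, so pyGetD's default is never used.
def findLandmarkIndex (ident : List Int) (ident_list : List Int) : Int × Int :=
  let n1 : Int := (PySem.List.pyRange 0 (ident_list.length : Int) 1).foldl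
    (fun n i => if PySem.List.pyGetD ident 0 0 = PySem.List.pyGetD ident_list i 0 then i else n) (-1)
  let n2 : Int := (PySem.List.pyRange 0 (ident_list.length : Int) 1).foldl
    (fun n i => if PySem.List.pyGetD ident 1 0 = PySem.List.pyGetD ident_list i 0 then i else n) (-1)
  (n1, n2)

-- ===== PORT B =====
-- One backward scan over reversed(list(enumerate(ident_list))): the first match seen is the
-- last index; break (stop the recursion) as soon as both landmarks are found.
def fliGo (a b : Int) : List (Int × Int) → Int → Int → Int × Int
  | [], n1, n2 => (n1, n2)
  | (i, v) :: rest, n1, n2 =>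
    let n1' := if n1 = -1 ∧ v = a then i else n1
    let n2' := if n2 = -1 ∧ v = b then i else n2
    if n1' ≠ -1 ∧ n2' ≠ -1 then (n1', n2') else fliGo a b rest n1' n2'

def findLandmarkIndex_alt (ident : List Int) (ident_list : List Int) : Int × Int :=
  let a := PySem.List.pyGetD ident 0 0
  let b := PySem.List.pyGetD ident 1 0
  fliGo a b (PySem.List.enumerate ident_list).reverse (-1) (-1)

-- ===== PRECONDITION & SPEC =====
-- Pre_ excludes ident with fewer than 2 elements: Python A raises IndexError on ident[0]/ident[1]
-- whenever ident_list is non-empty, and B raises there as well (also when ident_list is empty).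
def Pre_findLandmarkIndex (ident : List Int) (ident_list : List Int) : Prop := 2 ≤ ident.length
instance (ident : List Int) (ident_list : List Int) : Decidable (Pre_findLandmarkIndex ident ident_list) := by unfold Pre_findLandmarkIndex; infer_instance

def pvWitness_findLandmarkIndex : List Int × List Int := ([3, 7], [1, 7, 3, 7])

def Spec_findLandmarkIndex (ident : List Int) (ident_list : List Int) (out : Int × Int) : Prop := out = findLandmarkIndex_alt ident ident_list
instance (ident : List Int) (ident_list : List Int) (out : Int × Int) : Decidable (Spec_findLandmarkIndex ident ident_list out) := by unfold Spec_findLandmarkIndex; infer_instance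

-- ===== CLAIM (what is proved, stated in full; the proofs are below) =====
def Claim_equal_findLandmarkIndex : Prop := ∀ (ident : List Int) (ident_list : List Int), Dom_findLandmarkIndex ident ident_list → Pre_findLandmarkIndex ident ident_list → Spec_findLandmarkIndex ident ident_list (findLandmarkIndex ident ident_list)

-- ===== LEMMAS AND PROOFS =====

-- first index matching a in ps, default d (the value a backward scan computes)
def firstIdxD (a : Int) : List (Int × Int) → Int → Int
  | [], d => d
  | (i, v) :: rest, d => if v = a then i else firstIdxD a rest d

theorem firstIdxD_append (a : Int) (x : Int × Int) : ∀ (u : List (Int × Int)) (d : Int),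
    firstIdxD a (u ++ [x]) d = firstIdxD a u (if x.2 = a then x.1 else d) := by
  intro u
  induction u with
  | nil => intro d; simp [firstIdxD]
  | cons p rest ih => intro d; cases p; simp [firstIdxD, ih]

theorem pyGetD_cons_shift (x : Int) (xs : List Int) (j : Int) (h : 1 ≤ j) :
    PySem.List.pyGetD (x :: xs) j 0 = PySem.List.pyGetD xs (j - 1) 0 := by
  rw [PySem.List.pyGetD_of_nonneg _ _ (by omega : (0:Int) ≤ j),
      PySem.List.pyGetD_of_nonneg _ _ (by omega : (0:Int) ≤ j - 1)]
  have h2 : j.toNat = (j-1).toNat + 1 := by omega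
  rw [h2, List.getD_cons_succ]

-- A's index-range scan, seen as a left fold over enumerate.
theorem afold_eq_enum (a : Int) (l : List Int) : ∀ (s init : Int), 0 ≤ s →
    (PySem.List.pyRange s (s + (l.length : Int)) 1).foldl
      (fun n i => if a = PySem.List.pyGetD l (i - s) 0 then i else n) init
    = (PySem.List.enumerate l s).foldl (fun n p => if a = p.2 then p.1 else n) init := by
  induction l with
  | nil =>
    intro s init _
    rw [PySem.List.pyRange_one_eq_nil (by simp)]
    simp [PySem.List.enumerate]
  | cons x xs ih =>
    intro s init hs
    rw [PySem.List.pyRange_one_cons (by simp), PySem.List.enumerate_cons]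
    simp only [List.foldl_cons, sub_self]
    have hx : PySem.List.pyGetD (x :: xs) 0 0 = x := by
      rw [PySem.List.pyGetD_of_nonneg _ _ le_rfl]; rfl
    rw [hx]
    have hb : s + ((x :: xs).length : Int) = (s + 1) + (xs.length : Int) := by
      simp; omega
    rw [hb]
    rw [PySem.List.foldl_congr_mem _
        (fun n i => if a = PySem.List.pyGetD (x :: xs) (i - s) 0 then i else n)
        (fun n i => if a = PySem.List.pyGetD xs (i - (s + 1)) 0 then i else n) _
        (by
          intro acc i hi
          have hmem := (PySem.List.mem_pyRange_one).1 hi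
          dsimp only
          rw [pyGetD_cons_shift _ _ _ (by omega)]
          have he : i - s - 1 = i - (s + 1) := by omega
          rw [he])]
    exact ih (s + 1) _ (by omega)

-- last-match left fold over l = first match over l.reverse (backward scan)
theorem lastfold_eq_firstIdxD_reverse (a : Int) : ∀ (l : List (Int × Int)) (init : Int),
    l.foldl (fun n p => if a = p.2 then p.1 else n) init = firstIdxD a l.reverse init := by
  intro l
  induction l with
  | nil => intro init; simp [firstIdxD]
  | cons x xs ih =>
    intro init
    cases x with
    | mk i v =>
      simp only [List.foldl_cons, List.reverse_cons]
      rw [firstIdxD_append, ih]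
      have hc : (if a = v then i else init) = (if v = a then i else init) := by
        by_cases h : v = a
        · simp [h]
        · simp [h, show ¬ a = v from fun hh => h hh.symm]
      rw [hc]

-- characterization of B's backward scan with early exit
theorem fliGo_eq (a b : Int) : ∀ (ps : List (Int × Int)) (n1 n2 : Int),
    (∀ p ∈ ps, 0 ≤ p.1) →
    fliGo a b ps n1 n2 =
      ((if n1 = -1 then firstIdxD a ps (-1) else n1),
       (if n2 = -1 then firstIdxD b ps (-1) else n2)) := by
  intro ps
  induction ps with
  | nil => intro n1 n2 _; simp [fliGo, firstIdxD]
  | cons p rest ih =>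
    intro n1 n2 hpos
    cases p with
    | mk i v =>
      have hi : (0:Int) ≤ i := hpos (i, v) (List.mem_cons_self ..)
      have hrest : ∀ p ∈ rest, 0 ≤ p.1 := fun p hp => hpos p (List.mem_cons_of_mem _ hp)
      simp only [fliGo, firstIdxD]
      by_cases hbrk : ((if n1 = -1 ∧ v = a then i else n1) ≠ -1 ∧ (if n2 = -1 ∧ v = b then i else n2) ≠ -1)
      · rw [if_pos hbrk]
        obtain ⟨h1, h2⟩ := hbrk
        simp only [Prod.mk.injEq]
        refine ⟨?_, ?_⟩
        · by_cases hc : n1 = -1 ∧ v = a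
          · simp [hc.1, hc.2]
          · rw [if_neg hc] at h1 ⊢
            by_cases hn : n1 = -1
            · exact absurd hn h1
            · simp [hn]
        · by_cases hc : n2 = -1 ∧ v = b
          · simp [hc.1, hc.2]
          · rw [if_neg hc] at h2 ⊢
            by_cases hn : n2 = -1
            · exact absurd hn h2
            · simp [hn]
      · rw [if_neg hbrk, ih _ _ hrest]
        simp only [Prod.mk.injEq]
        refine ⟨?_, ?_⟩
        · by_cases hc : n1 = -1 ∧ v = a
          · have : i ≠ -1 := by omega
            simp [hc.1, hc.2, this]
          · rw [if_neg hc]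
            by_cases hn : n1 = -1
            · have hv : v ≠ a := fun hv => hc ⟨hn, hv⟩
              simp [hn, hv]
            · simp [hn]
        · by_cases hc : n2 = -1 ∧ v = b
          · have : i ≠ -1 := by omega
            simp [hc.1, hc.2, this]
          · rw [if_neg hc]
            by_cases hn : n2 = -1
            · have hv : v ≠ b := fun hv => hc ⟨hn, hv⟩
              simp [hn, hv]
            · simp [hn]

theorem enumerate_fst_nonneg (l : List Int) (p : Int × Int)
    (hp : p ∈ (PySem.List.enumerate l 0).reverse) : 0 ≤ p.1 := by
  rw [List.mem_reverse] at hp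
  obtain ⟨k, hk, rfl⟩ := (PySem.List.mem_enumerate_iff _ _ _).1 hp
  simp

theorem component_eq (a : Int) (l : List Int) :
    (PySem.List.pyRange 0 (l.length : Int) 1).foldl
      (fun n i => if a = PySem.List.pyGetD l i 0 then i else n) (-1)
    = firstIdxD a (PySem.List.enumerate l 0).reverse (-1) := by
  rw [← lastfold_eq_firstIdxD_reverse]
  have h := afold_eq_enum a l 0 (-1) le_rfl
  simp only [zero_add, sub_zero] at h
  rw [← h]

-- ===== VERDICT (by name: the statement is the Claim_ definition above) =====
theorem findLandmarkIndex_spec : Claim_equal_findLandmarkIndex := by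
  intro ident ident_list _ _
  unfold Spec_findLandmarkIndex findLandmarkIndex findLandmarkIndex_alt
  simp only
  rw [fliGo_eq _ _ _ _ _ (enumerate_fst_nonneg ident_list)]
  simp only [reduceIte]
  rw [component_eq, component_eq]
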